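-- pv_equiv track=rewrite | github.com/MrJohn6774/advent-of-code | 2023-python/day-7/part_1.py | cal_strength
-- ===== SOURCE A (Python) =====
-- def cal_strength(hand: list[str]) -> int:
--     total_value = 0
--     combo_value = 0
--     for idx in range(len(hand) - 1):
--         if hand[idx] == hand[idx+1]:
--             combo_value += 1
--             total_value += combo_value
--         else:
--             combo_value = 0
--     return total_value
-- ===== SOURCE B (Python) =====
-- def cal_strength(hand: list[str]) -> int:
--     # Run-length pass: close each maximal run of equal adjacent cards with
--     # its triangular number run*(run-1)//2 instead of accumulating a combo counter.
--     total = 0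
--     run = 0
--     prev = None
--     for card in hand:
--         if card == prev:
--             run += 1
--         else:
--             total += run * (run - 1) // 2
--             run = 1
--             prev = card
--     return total + run * (run - 1) // 2
-- ===== Notes on version B (the rewrite author's own statement) =====
-- stated objective: simpler
-- what changed: A walks index pairs hand[i]==hand[i+1] accumulating an incremental combo counter; B makes one run-length pass over the elements with a prev sentinel and adds the closed-form triangular number run*(run-1)//2 once per maximal run.
import Mathlib
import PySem

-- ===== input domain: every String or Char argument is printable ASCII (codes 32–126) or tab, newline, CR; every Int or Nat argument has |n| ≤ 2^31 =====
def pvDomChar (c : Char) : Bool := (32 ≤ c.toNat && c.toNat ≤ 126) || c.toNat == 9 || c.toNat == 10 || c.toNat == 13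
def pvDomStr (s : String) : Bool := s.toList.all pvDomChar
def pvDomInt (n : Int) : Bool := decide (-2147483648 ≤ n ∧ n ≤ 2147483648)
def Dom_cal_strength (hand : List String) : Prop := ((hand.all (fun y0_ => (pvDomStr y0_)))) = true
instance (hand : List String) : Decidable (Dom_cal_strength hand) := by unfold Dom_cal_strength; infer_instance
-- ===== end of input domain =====

-- B replaces A's incremental combo counter over adjacent index pairs by a single
-- run-length pass that closes each maximal run with its triangular number
-- run*(run-1)//2 (objective: simpler; same return value, no speed claim).

-- ===== PORT A =====
def cal_strength (hand : List String) : Int :=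
  (((PySem.List.pyRange 0 ((hand.length : Int) - 1) 1).foldl
    (fun (s : Int × Int) idx =>
      if PySem.List.pyGet? hand idx = PySem.List.pyGet? hand (idx + 1) then
        (s.1 + (s.2 + 1), s.2 + 1)
      else (s.1, 0)) ((0 : Int), (0 : Int)))).1

-- ===== PORT B =====
def cal_strength_alt (hand : List String) : Int :=
  let s := hand.foldl
    (fun (s : Int × Int × Option String) card =>
      if some card = s.2.2 then (s.1, s.2.1 + 1, s.2.2)
      else (s.1 + PySem.Int.floordiv (s.2.1 * (s.2.1 - 1)) 2, 1, some card))
    ((0 : Int), (0 : Int), (none : Option String))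
  s.1 + PySem.Int.floordiv (s.2.1 * (s.2.1 - 1)) 2

-- ===== PRECONDITION & SPEC =====
def Spec_cal_strength (hand : List String) (out : Int) : Prop := out = cal_strength_alt hand
instance (hand : List String) (out : Int) : Decidable (Spec_cal_strength hand out) := by unfold Spec_cal_strength; infer_instance

-- ===== CLAIM (what is proved, stated in full; the proofs are below) =====
def Claim_equal_cal_strength : Prop := ∀ (hand : List String), Dom_cal_strength hand → Spec_cal_strength hand (cal_strength hand)

-- ===== LEMMAS AND PROOFS =====

-- A's loop body, named for the proofs
def fA (hand : List String) (s : Int × Int) (idx : Int) : Int × Int :=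
  if PySem.List.pyGet? hand idx = PySem.List.pyGet? hand (idx + 1) then
    (s.1 + (s.2 + 1), s.2 + 1)
  else (s.1, 0)

-- structural form of A's loop: walk adjacent pairs
def pairA : List String → Int × Int → Int × Int
  | [], s => s
  | [_], s => s
  | x :: y :: r, s => pairA (y :: r) (if x = y then (s.1 + (s.2 + 1), s.2 + 1) else (s.1, 0))

-- B's loop body and triangular number, named for the proofs
def tri (r : Int) : Int := PySem.Int.floordiv (r * (r - 1)) 2

def fB (s : Int × Int × Option String) (card : String) : Int × Int × Option String :=
  if some card = s.2.2 then (s.1, s.2.1 + 1, s.2.2)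
  else (s.1 + tri s.2.1, 1, some card)

theorem tri_zero : tri 0 = 0 := by decide

theorem tri_one : tri 1 = 0 := by decide

theorem tri_succ (r : Int) : tri (r + 1) = tri r + r := by
  obtain ⟨k, hk⟩ : Even (r * (r - 1)) := by
    rcases Int.even_or_odd r with h | h
    · exact h.mul_right _
    · obtain ⟨k, hk⟩ := h
      have he : Even (r - 1) := ⟨k, by omega⟩
      exact he.mul_left r
  have h1 : r * (r - 1) = 2 * k := by omega
  have h2 : (r + 1) * (r + 1 - 1) = 2 * (k + r) := by linear_combination h1
  unfold tri
  rw [h1, h2, PySem.Int.floordiv, PySem.Int.floordiv,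
    Int.mul_fdiv_cancel_left _ (by norm_num), Int.mul_fdiv_cancel_left _ (by norm_num)]

theorem fA_shift (x : String) (tl : List String) (s : Int × Int) (k : Nat) :
    fA (x :: tl) s ((k : Int) + 1) = fA tl s (k : Int) := by
  unfold fA
  rw [PySem.List.pyGet?_cons_succ]
  have : ((k : Int) + 1) + 1 = ((k + 1 : Nat) : Int) + 1 := by push_cast; ring
  rw [this, PySem.List.pyGet?_cons_succ]
  push_cast
  rfl

theorem foldA_eq (hand : List String) (s : Int × Int) :
    (List.range (hand.length - 1)).foldl (fun (s : Int × Int) (k : Nat) => fA hand s (k : Int)) s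
      = pairA hand s := by
  induction hand generalizing s with
  | nil => simp [pairA]
  | cons x tl ih =>
    cases tl with
    | nil => simp [pairA]
    | cons y r =>
      have hn : (x :: y :: r).length - 1 = r.length + 1 := by simp
      rw [hn, List.range_succ_eq_map]
      rw [List.foldl_cons, List.foldl_map]
      have hfn : (fun (s : Int × Int) (k : Nat) => fA (x :: y :: r) s ((k.succ : Nat) : Int))
          = fun (s : Int × Int) (k : Nat) => fA (y :: r) s (k : Int) := by
        funext s k
        simpa [Nat.succ_eq_add_one] using fA_shift x (y :: r) s k
      have hstep : fA (x :: y :: r) s ((0 : Nat) : Int)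
          = (if x = y then (s.1 + (s.2 + 1), s.2 + 1) else (s.1, 0)) := by
        unfold fA
        rw [show ((0 : Nat) : Int) + 1 = ((1 : Nat) : Int) by norm_num]
        rw [PySem.List.pyGet?_natCast, PySem.List.pyGet?_natCast]
        simp
      have hn2 : r.length = (y :: r).length - 1 := by simp
      rw [hfn, hstep, hn2, ih]
      simp [pairA]

theorem A_eq_pairA (hand : List String) : cal_strength hand = (pairA hand (0, 0)).1 := by
  unfold cal_strength
  have hlen : (((hand.length : Int) - 1) - 0).toNat = hand.length - 1 := by omega
  rw [PySem.List.pyRange_one, List.foldl_map, hlen]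
  show ((List.range (hand.length - 1)).foldl
      (fun (s : Int × Int) (k : Nat) => fA hand s ((0 : Int) + (k : Int))) (0, 0)).1 = _
  have hfn : (fun (s : Int × Int) (k : Nat) => fA hand s ((0 : Int) + (k : Int)))
      = fun (s : Int × Int) (k : Nat) => fA hand s (k : Int) := by
    funext s k; norm_num
  rw [hfn, foldA_eq]

theorem main_inv (rest : List String) : ∀ (x : String) (t r : Int), 1 ≤ r →
    (pairA (x :: rest) (t + tri r, r - 1)).1
      = (rest.foldl fB (t, r, some x)).1 + tri (rest.foldl fB (t, r, some x)).2.1 := by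
  induction rest with
  | nil => intro x t r _; simp [pairA]
  | cons y rs ih =>
    intro x t r hr
    by_cases hxy : x = y
    · subst hxy
      have hfb : fB (t, r, some x) x = (t, r + 1, some x) := by simp [fB]
      have hpa : pairA (x :: x :: rs) (t + tri r, r - 1)
          = pairA (x :: rs) (t + tri (r + 1), (r + 1) - 1) := by
        simp [pairA, tri_succ]
        rw [add_assoc]
      rw [List.foldl_cons, hfb, hpa]
      exact ih x t (r + 1) (by omega)
    · have hfb : fB (t, r, some x) y = (t + tri r, 1, some y) := by
        simp [fB, hxy]
        intro h; exact absurd h.symm hxy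
      have hpa : pairA (x :: y :: rs) (t + tri r, r - 1)
          = pairA (y :: rs) ((t + tri r) + tri 1, 1 - 1) := by
        simp [pairA, hxy, tri_one]
      rw [List.foldl_cons, hfb, hpa]
      exact ih y (t + tri r) 1 (by omega)

theorem B_eq (hand : List String) :
    cal_strength_alt hand
      = (hand.foldl fB (0, 0, none)).1 + tri (hand.foldl fB (0, 0, none)).2.1 := rfl

-- ===== VERDICT (by name: the statement is the Claim_ definition above) =====
theorem cal_strength_spec : Claim_equal_cal_strength := by
  intro hand _
  unfold Spec_cal_strength
  rw [A_eq_pairA, B_eq]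
  cases hand with
  | nil => simp [pairA, tri_zero]
  | cons x rest =>
    have hfb : fB (0, 0, none) x = (0 + tri 1, 1, some x) := by
      simp [fB, tri_zero, tri_one]
    rw [List.foldl_cons, hfb]
    have := main_inv rest x 0 1 (by omega)
    simpa [tri_one] using this
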